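-- pv_equiv track=rewrite | github.com/MrBrantCode/unitest_baseline | mut_generate/mist_train_cf/cf_22381/solution.py | validate_strings
-- ===== SOURCE A (Python) =====
-- def validate_strings(s1, s2):
--     # Condition 1
--     if len(s1) < 8 or len(s2) < 8 or len(s1) + len(s2) > 20:
--         return False
--
--     # Condition 2
--     special_char_count = sum(1 for char in s1 if not char.isalnum())
--     if special_char_count < 2 or not any(char.islower() for char in s1) or not s1[0].isalpha():
--         return False
--
--     # Condition 3
--     uppercase_count = sum(1 for char in s2 if char.isupper())
--     if uppercase_count < 2 or not any(char.isdigit() for char in s2) or not s2[-1].isalpha():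
--         return False
--
--     # Condition 4
--     if any(s1[i] == s1[i+1] for i in range(len(s1)-1)) or any(s2[i] == s2[i+1] for i in range(len(s2)-1)):
--         return False
--
--     # Condition 5
--     if not any(char.isspace() for char in s1) or not any(char.isspace() for char in s2):
--         return False
--
--     return True
-- ===== SOURCE B (Python) =====
-- def validate_strings(s1, s2):
--     # Condition 1 first, so short strings never reach the indexing below.
--     if len(s1) < 8 or len(s2) < 8 or len(s1) + len(s2) > 20:
--         return False
--     # One pass over s1: special-char tally, any-lowercase, any-whitespace, adjacent-equal.
--     special = 0
--     has_lower = space1 = dup1 = False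
--     prev = None
--     for ch in s1:
--         if not ch.isalnum():
--             special += 1
--         if ch.islower():
--             has_lower = True
--         if ch.isspace():
--             space1 = True
--         if prev is not None and prev == ch:
--             dup1 = True
--         prev = ch
--     # One pass over s2: uppercase tally, any-digit, any-whitespace, adjacent-equal.
--     upper = 0
--     has_digit = space2 = dup2 = False
--     prev = None
--     for ch in s2:
--         if ch.isupper():
--             upper += 1
--         if ch.isdigit():
--             has_digit = True
--         if ch.isspace():
--             space2 = True
--         if prev is not None and prev == ch:
--             dup2 = True
--         prev = ch
--     return (special >= 2 and has_lower and s1[0].isalpha()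
--             and upper >= 2 and has_digit and s2[-1].isalpha()
--             and not dup1 and not dup2 and space1 and space2)
-- ===== Notes on version B (the rewrite author's own statement) =====
-- stated objective: alternative
-- what changed: A's six separate scans over the two strings (two counting sums, four any-generators plus the index-based adjacent-pair scan) are replaced by one accumulator pass over each string that tallies the count, the any-flags and the adjacent-duplicate flag while tracking the previous character.
import Mathlib
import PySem

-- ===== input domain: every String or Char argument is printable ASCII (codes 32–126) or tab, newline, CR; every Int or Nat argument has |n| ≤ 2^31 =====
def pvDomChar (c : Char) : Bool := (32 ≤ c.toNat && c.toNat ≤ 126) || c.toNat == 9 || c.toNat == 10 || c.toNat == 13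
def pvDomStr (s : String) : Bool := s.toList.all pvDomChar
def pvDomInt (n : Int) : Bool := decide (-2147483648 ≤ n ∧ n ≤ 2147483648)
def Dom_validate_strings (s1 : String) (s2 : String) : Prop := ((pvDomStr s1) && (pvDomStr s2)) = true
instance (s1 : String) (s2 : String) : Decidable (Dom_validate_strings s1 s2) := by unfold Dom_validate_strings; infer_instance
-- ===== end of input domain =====

-- B replaces A's six separate scans of the two strings by one accumulator pass over each
-- string (alternative decomposition; same asymptotic cost).

-- ===== PORT A =====
def validate_strings (s1 : String) (s2 : String) : Bool :=
  let c1 := s1.toList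
  let c2 := s2.toList
  -- Condition 1
  if decide (c1.length < 8) || decide (c2.length < 8) || decide (20 < c1.length + c2.length) then false
  else
  -- Condition 2
  let special_char_count : Int := ((c1.filter (fun ch => ! PySem.Chars.isalnum ch)).map (fun _ => (1:Int))).sum
  if decide (special_char_count < 2) || ! c1.any (fun ch => PySem.Chars.islower ch)
     || ! PySem.Chars.isalpha (PySem.List.pyGetD c1 0 ' ') then false
  else
  -- Condition 3
  let uppercase_count : Int := ((c2.filter (fun ch => PySem.Chars.isupper ch)).map (fun _ => (1:Int))).sum
  if decide (uppercase_count < 2) || ! c2.any (fun ch => PySem.Chars.isdigit ch)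
     || ! PySem.Chars.isalpha (PySem.List.pyGetD c2 (-1) ' ') then false
  else
  -- Condition 4
  if (PySem.List.pyRange 0 ((c1.length : Int) - 1) 1).any
       (fun i => PySem.List.pyGetD c1 i ' ' == PySem.List.pyGetD c1 (i+1) ' ')
     || (PySem.List.pyRange 0 ((c2.length : Int) - 1) 1).any
       (fun i => PySem.List.pyGetD c2 i ' ' == PySem.List.pyGetD c2 (i+1) ' ') then false
  else
  -- Condition 5
  if ! c1.any (fun ch => PySem.Chars.isspace ch) || ! c2.any (fun ch => PySem.Chars.isspace ch) then false
  else true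

-- ===== PORT B =====
-- single pass over s1: (special tally, any-lowercase, any-whitespace, adjacent-dup)
def pvScan1 (cs : List Char) : Int × Bool × Bool × Bool :=
  let r := cs.foldl
    (fun (st : Int × Bool × Bool × Bool × Option Char) ch =>
      ((if ! PySem.Chars.isalnum ch then st.1 + 1 else st.1),
       (st.2.1 || PySem.Chars.islower ch),
       (st.2.2.1 || PySem.Chars.isspace ch),
       (st.2.2.2.1 || (match st.2.2.2.2 with | some p => p == ch | none => false)),
       some ch))
    ((0:Int), false, false, false, (none : Option Char))
  (r.1, r.2.1, r.2.2.1, r.2.2.2.1)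

-- single pass over s2: (uppercase tally, any-digit, any-whitespace, adjacent-dup)
def pvScan2 (cs : List Char) : Int × Bool × Bool × Bool :=
  let r := cs.foldl
    (fun (st : Int × Bool × Bool × Bool × Option Char) ch =>
      ((if PySem.Chars.isupper ch then st.1 + 1 else st.1),
       (st.2.1 || PySem.Chars.isdigit ch),
       (st.2.2.1 || PySem.Chars.isspace ch),
       (st.2.2.2.1 || (match st.2.2.2.2 with | some p => p == ch | none => false)),
       some ch))
    ((0:Int), false, false, false, (none : Option Char))
  (r.1, r.2.1, r.2.2.1, r.2.2.2.1)

def validate_strings_alt (s1 : String) (s2 : String) : Bool :=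
  let c1 := s1.toList
  let c2 := s2.toList
  if decide (c1.length < 8) || decide (c2.length < 8) || decide (20 < c1.length + c2.length) then false
  else
    let t1 := pvScan1 c1
    let t2 := pvScan2 c2
    decide (2 ≤ t1.1) && t1.2.1 && PySem.Chars.isalpha (PySem.List.pyGetD c1 0 ' ')
      && decide (2 ≤ t2.1) && t2.2.1 && PySem.Chars.isalpha (PySem.List.pyGetD c2 (-1) ' ')
      && ! t1.2.2.2 && ! t2.2.2.2 && t1.2.2.1 && t2.2.2.1

-- ===== PRECONDITION & SPEC =====
def Spec_validate_strings (s1 : String) (s2 : String) (out : Bool) : Prop := out = validate_strings_alt s1 s2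
instance (s1 : String) (s2 : String) (out : Bool) : Decidable (Spec_validate_strings s1 s2 out) := by unfold Spec_validate_strings; infer_instance

-- ===== CLAIM (what is proved, stated in full; the proofs are below) =====
def Claim_equal_validate_strings : Prop := ∀ (s1 : String) (s2 : String), Dom_validate_strings s1 s2 → Spec_validate_strings s1 s2 (validate_strings s1 s2)

-- ===== LEMMAS AND PROOFS =====

-- adjacent-equal predicate used to characterise both condition 4 of A and the dup flag of B
def pvAdj : List Char → Bool
  | [] => false
  | [_] => false
  | a :: b :: t => (a == b) || pvAdj (b :: t)

theorem pv_sum_ones_eq_countP (p : Char → Bool) (cs : List Char) :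
    ((cs.filter p).map (fun _ => (1:Int))).sum = (cs.countP p : Int) := by
  induction cs with
  | nil => simp
  | cons c t ih =>
    by_cases h : p c <;> simp [h, List.countP_eq_length_filter] <;> omega

theorem pv_range_adj_nat (cs : List Char) :
    (List.range (cs.length - 1)).any (fun k => cs.getD k ' ' == cs.getD (k+1) ' ') = pvAdj cs := by
  induction cs with
  | nil => simp [pvAdj]
  | cons a t ih =>
    cases t with
    | nil => simp [pvAdj]
    | cons b t' =>
      have : (a :: b :: t').length - 1 = ((b :: t').length - 1) + 1 := by simp
      rw [this, List.range_succ_eq_map, pvAdj]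
      simp only [List.any_cons, List.any_map]
      rw [← ih]
      rfl

theorem pv_range_adj (cs : List Char) :
    (PySem.List.pyRange 0 ((cs.length : Int) - 1) 1).any
      (fun i => PySem.List.pyGetD cs i ' ' == PySem.List.pyGetD cs (i+1) ' ') = pvAdj cs := by
  rw [PySem.List.pyRange_one, ← pv_range_adj_nat cs]
  have h : ((cs.length : Int) - 1 - 0).toNat = cs.length - 1 := by omega
  rw [h, List.any_map]
  apply List.any_congr rfl
  intro k
  have h1 : (0 : Int) + (k : Int) = ((k : Nat) : Int) := by omega
  have h2 : (k : Int) + 1 = (((k + 1 : Nat)) : Int) := by omega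
  simp only [Function.comp, h1, h2, PySem.List.pyGetD_natCast]

-- last element carried by the scan state
def pvLastOf (p : Char) : List Char → Char
  | [] => p
  | c :: t => pvLastOf c t

theorem pvScan1_foldl (cs : List Char) (a : Int) (l sp dp : Bool) (p : Char) :
    cs.foldl
      (fun (st : Int × Bool × Bool × Bool × Option Char) ch =>
        ((if ! PySem.Chars.isalnum ch then st.1 + 1 else st.1),
         (st.2.1 || PySem.Chars.islower ch),
         (st.2.2.1 || PySem.Chars.isspace ch),
         (st.2.2.2.1 || (match st.2.2.2.2 with | some p => p == ch | none => false)),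
         some ch))
      (a, l, sp, dp, some p)
    = (a + ((cs.countP (fun ch => ! PySem.Chars.isalnum ch)) : Int),
       l || cs.any (fun ch => PySem.Chars.islower ch),
       sp || cs.any (fun ch => PySem.Chars.isspace ch),
       dp || pvAdj (p :: cs),
       some (pvLastOf p cs)) := by
  induction cs generalizing a l sp dp p with
  | nil => simp [pvAdj, pvLastOf]
  | cons c t ih =>
    simp only [List.foldl_cons, ih, List.countP_cons, List.any_cons, pvAdj, pvLastOf,
      Prod.mk.injEq]
    refine ⟨?_, by cases l <;> simp, by cases sp <;> simp, ?_, trivial⟩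
    · by_cases h : PySem.Chars.isalnum c <;> simp [h] <;> omega
    · cases dp <;> simp

theorem pvScan1_eq (cs : List Char) :
    pvScan1 cs = ((cs.countP (fun ch => ! PySem.Chars.isalnum ch) : Int),
                  cs.any (fun ch => PySem.Chars.islower ch),
                  cs.any (fun ch => PySem.Chars.isspace ch),
                  pvAdj cs) := by
  cases cs with
  | nil => simp [pvScan1, pvAdj]
  | cons c t =>
    simp only [pvScan1, List.foldl_cons]
    rw [pvScan1_foldl]
    by_cases h : PySem.Chars.isalnum c <;> simp [h] <;> omega

theorem pvScan2_foldl (cs : List Char) (a : Int) (l sp dp : Bool) (p : Char) :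
    cs.foldl
      (fun (st : Int × Bool × Bool × Bool × Option Char) ch =>
        ((if PySem.Chars.isupper ch then st.1 + 1 else st.1),
         (st.2.1 || PySem.Chars.isdigit ch),
         (st.2.2.1 || PySem.Chars.isspace ch),
         (st.2.2.2.1 || (match st.2.2.2.2 with | some p => p == ch | none => false)),
         some ch))
      (a, l, sp, dp, some p)
    = (a + ((cs.countP (fun ch => PySem.Chars.isupper ch)) : Int),
       l || cs.any (fun ch => PySem.Chars.isdigit ch),
       sp || cs.any (fun ch => PySem.Chars.isspace ch),
       dp || pvAdj (p :: cs),
       some (pvLastOf p cs)) := by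
  induction cs generalizing a l sp dp p with
  | nil => simp [pvAdj, pvLastOf]
  | cons c t ih =>
    simp only [List.foldl_cons, ih, List.countP_cons, List.any_cons, pvAdj, pvLastOf,
      Prod.mk.injEq]
    refine ⟨?_, by cases l <;> simp, by cases sp <;> simp, ?_, trivial⟩
    · by_cases h : PySem.Chars.isupper c <;> simp [h] <;> omega
    · cases dp <;> simp

theorem pvScan2_eq (cs : List Char) :
    pvScan2 cs = ((cs.countP (fun ch => PySem.Chars.isupper ch) : Int),
                  cs.any (fun ch => PySem.Chars.isdigit ch),
                  cs.any (fun ch => PySem.Chars.isspace ch),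
                  pvAdj cs) := by
  cases cs with
  | nil => simp [pvScan2, pvAdj]
  | cons c t =>
    simp only [pvScan2, List.foldl_cons]
    rw [pvScan2_foldl]
    by_cases h : PySem.Chars.isupper c <;> simp [h] <;> omega

theorem pv_decide_lt (n : Int) : decide (n < 2) = ! decide (2 ≤ n) := by
  by_cases h : (2:Int) ≤ n <;> simp [h] <;> omega

-- A's early-return chain equals B's one conjunction, for arbitrary atoms
theorem pv_combine : ∀ (q1 l1 a1 q2 d2 a2 j1 j2 s1 s2 : Bool),
    (if (! q1 || ! l1 || ! a1) then false
     else if (! q2 || ! d2 || ! a2) then false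
     else if (j1 || j2) then false
     else if (! s1 || ! s2) then false
     else true)
    = (q1 && l1 && a1 && q2 && d2 && a2 && ! j1 && ! j2 && s1 && s2) := by
  decide

-- ===== VERDICT (by name: the statement is the Claim_ definition above) =====
theorem validate_strings_spec : Claim_equal_validate_strings := by
  intro s1 s2 _
  unfold Spec_validate_strings validate_strings validate_strings_alt
  simp only [pvScan1_eq, pvScan2_eq, pv_sum_ones_eq_countP, pv_range_adj, pv_decide_lt]
  by_cases hg : (decide (s1.toList.length < 8) || decide (s2.toList.length < 8)
      || decide (20 < s1.toList.length + s2.toList.length)) = true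
  · rw [if_pos hg, if_pos hg]
  · rw [if_neg hg, if_neg hg]
    exact pv_combine _ _ _ _ _ _ _ _ _ _
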